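-- pv_equiv track=rewrite | github.com/caionishizawa/bot-blofin | src/modules/performance.py | _to_pg
-- ===== SOURCE A (Python) =====
-- def _to_pg(query: str) -> str:
--     """Convert SQLite ? placeholders to PostgreSQL $1, $2, ..."""
--     i = 0
--     result = []
--     for ch in query:
--         if ch == "?":
--             i += 1
--             result.append(f"${i}")
--         else:
--             result.append(ch)
--     # SQLite upsert → PostgreSQL upsert
--     q = "".join(result)
--     q = q.replace("INSERT OR REPLACE INTO", "INSERT INTO")
--     q = q.replace(
--         "ON CONFLICT(chat_id) DO UPDATE SET enabled=1, title=excluded.title",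
--         "ON CONFLICT(chat_id) DO UPDATE SET enabled=TRUE, title=EXCLUDED.title",
--     )
--     return q
-- ===== SOURCE B (Python) =====
-- def _to_pg(query: str) -> str:
--     """Convert SQLite ? placeholders to PostgreSQL $1, $2, ..."""
--     parts = query.split("?")
--     q = parts[0] + "".join(f"${i}{part}" for i, part in enumerate(parts[1:], start=1))
--     # SQLite upsert -> PostgreSQL upsert
--     q = q.replace("INSERT OR REPLACE INTO", "INSERT INTO")
--     q = q.replace(
--         "ON CONFLICT(chat_id) DO UPDATE SET enabled=1, title=excluded.title",
--         "ON CONFLICT(chat_id) DO UPDATE SET enabled=TRUE, title=EXCLUDED.title",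
--     )
--     return q
-- ===== Notes on version B (the rewrite author's own statement) =====
-- stated objective: idiomatic
-- what changed: Replaces the per-character counting loop with a single split on the placeholder character followed by one join that interleaves the numbered parameters between the segments; the trailing replace calls are unchanged.
import Mathlib
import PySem

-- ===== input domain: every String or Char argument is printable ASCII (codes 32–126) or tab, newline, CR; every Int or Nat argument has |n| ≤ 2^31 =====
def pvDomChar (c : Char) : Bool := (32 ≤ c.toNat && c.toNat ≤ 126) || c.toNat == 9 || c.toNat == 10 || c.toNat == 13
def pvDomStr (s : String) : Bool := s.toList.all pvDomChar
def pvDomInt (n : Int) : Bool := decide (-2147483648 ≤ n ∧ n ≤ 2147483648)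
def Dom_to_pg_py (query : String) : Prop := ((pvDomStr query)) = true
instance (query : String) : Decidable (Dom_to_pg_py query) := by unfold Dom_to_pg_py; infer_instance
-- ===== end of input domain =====

-- B replaces A's per-character counting loop by a split on "?" rejoined with $1..$n between the segments (idiomatic decomposition; same O(n) cost).


-- ===== PORT A =====
-- literal port of A: one pass over the characters with a counter, appending "$i" or the character
def to_pg_py (query : String) : String :=
  let st := query.toList.foldl
    (fun (st : Int × List String) ch =>
      if ch = '?' then (st.1 + 1, st.2 ++ ["$" ++ PySem.Int.toStr (st.1 + 1)])
      else (st.1, st.2 ++ [String.ofList [ch]]))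
    (0, [])
  let q := PySem.Str.join "" st.2
  let q := PySem.Str.replace q "INSERT OR REPLACE INTO" "INSERT INTO"
  PySem.Str.replace q "ON CONFLICT(chat_id) DO UPDATE SET enabled=1, title=excluded.title"
    "ON CONFLICT(chat_id) DO UPDATE SET enabled=TRUE, title=EXCLUDED.title"

-- ===== PORT B =====
-- literal port of B: parts = query.split("?"); parts[0] + "".join(f"${i}{part}" for i, part in enumerate(parts[1:], 1))
def to_pg_py_alt (query : String) : String :=
  let parts : List String := (PySem.Chars.splitOn query.toList "?".toList).map String.ofList
  let q := PySem.List.pyGetD parts 0 "" ++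
    PySem.Str.join "" ((PySem.List.enumerate (PySem.List.slice parts (some 1) none) 1).map
      (fun ip => "$" ++ PySem.Int.toStr ip.1 ++ ip.2))
  let q := PySem.Str.replace q "INSERT OR REPLACE INTO" "INSERT INTO"
  PySem.Str.replace q "ON CONFLICT(chat_id) DO UPDATE SET enabled=1, title=excluded.title"
    "ON CONFLICT(chat_id) DO UPDATE SET enabled=TRUE, title=EXCLUDED.title"

-- ===== PRECONDITION & SPEC =====
def Spec_to_pg_py (query : String) (out : String) : Prop := out = to_pg_py_alt query
instance (query : String) (out : String) : Decidable (Spec_to_pg_py query out) := by unfold Spec_to_pg_py; infer_instance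

-- ===== CLAIM (what is proved, stated in full; the proofs are below) =====
def Claim_equal_to_pg_py : Prop := ∀ (query : String), Dom_to_pg_py query → Spec_to_pg_py query (to_pg_py query)

-- ===== LEMMAS AND PROOFS =====

-- reference split of a character list at '?' (proof-only)
def pvSplitQ : List Char → List (List Char)
  | [] => [[]]
  | c :: rest =>
    if c = '?' then [] :: pvSplitQ rest
    else match pvSplitQ rest with
      | [] => [[c]]
      | p :: ps => (c :: p) :: ps

-- the character stream both programs produce before the replace calls, counter starting at i
def pvRun : List Char → Int → List Char
  | [], _ => []
  | c :: rest, i =>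
    if c = '?' then ('$' :: (PySem.Int.toStr (i + 1)).toList) ++ pvRun rest (i + 1)
    else c :: pvRun rest i

-- B's interleaving of "$i" before each remaining segment
def pvInter : List (List Char) → Int → List Char
  | [], _ => []
  | p :: ps, i => ('$' :: (PySem.Int.toStr i).toList ++ p) ++ pvInter ps (i + 1)

def pvConsH (x : List Char) : List (List Char) → List (List Char)
  | [] => [x]
  | p :: ps => (x ++ p) :: ps

lemma pvSplitQ_ne_nil (cs : List Char) : pvSplitQ cs ≠ [] := by
  induction cs with
  | nil => simp [pvSplitQ]
  | cons c rest ih =>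
    simp only [pvSplitQ]
    split_ifs
    · simp
    · cases h : pvSplitQ rest <;> simp

lemma pvConsH_nil_of_ne (ps : List (List Char)) (h : ps ≠ []) : pvConsH [] ps = ps := by
  cases ps with
  | nil => exact absurd rfl h
  | cons p ps => simp [pvConsH]

lemma pvConsH_consH (x y : List Char) (ps : List (List Char)) :
    pvConsH x (pvConsH y ps) = pvConsH (x ++ y) ps := by
  cases ps <;> simp [pvConsH]

lemma pv_go_eq : ∀ (fuel : Nat) (l cur : List Char) (hacc : List (List Char)),
    l.length ≤ fuel →
    PySem.Chars.splitOn.go ['?'] fuel l cur hacc =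
      hacc.reverse ++ pvConsH cur.reverse (pvSplitQ l) := by
  intro fuel
  induction fuel with
  | zero =>
    intro l cur hacc hl
    have : l = [] := List.length_eq_zero_iff.mp (Nat.le_zero.mp hl)
    subst this
    simp [PySem.Chars.splitOn.go, pvSplitQ, pvConsH]
  | succ fuel ih =>
    intro l cur hacc hl
    cases l with
    | nil => simp [PySem.Chars.splitOn.go, pvSplitQ, pvConsH]
    | cons c rest =>
      simp only [PySem.Chars.splitOn.go]
      by_cases hc : c = '?'
      · subst hc
        have hpre : List.isPrefixOf ['?'] ('?' :: rest) = true := by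
          simp [List.isPrefixOf]
        simp only [hpre, if_pos, List.length_cons, List.length_nil, List.drop_succ_cons,
          List.drop_zero]
        rw [ih rest [] (cur.reverse :: hacc) (by simp at hl; omega)]
        cases h : pvSplitQ rest with
        | nil => exact absurd h (pvSplitQ_ne_nil rest)
        | cons p ps => simp [pvSplitQ, h, pvConsH]
      · have hpre : List.isPrefixOf ['?'] (c :: rest) = false := by
          simp only [List.isPrefixOf, Bool.and_eq_false_iff, beq_eq_false_iff_ne, ne_eq]
          exact Or.inl fun h => hc h.symm
        simp only [hpre, Bool.false_eq_true, if_false]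
        rw [ih rest (c :: cur) hacc (by simp at hl; omega)]
        have : pvSplitQ (c :: rest) = pvConsH [c] (pvSplitQ rest) := by
          simp only [pvSplitQ, if_neg hc]
          cases h : pvSplitQ rest <;> simp [pvConsH]
        rw [this, pvConsH_consH]
        simp

lemma pv_splitOn_eq (cs : List Char) : PySem.Chars.splitOn cs ['?'] = pvSplitQ cs := by
  unfold PySem.Chars.splitOn
  rw [pv_go_eq (cs.length + 1) cs [] [] (Nat.le_succ _)]
  simp [pvConsH_nil_of_ne _ (pvSplitQ_ne_nil cs)]

lemma pv_join_nil_flatten (xs : List (List Char)) :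
    PySem.Chars.join [] xs = xs.flatten := by
  simp only [PySem.Chars.join, List.intercalate]
  induction xs with
  | nil => rfl
  | cons p ps ih => cases ps <;> simp_all [List.intersperse]

-- A's loop, flattened
lemma pv_A_loop (cs : List Char) : ∀ (i : Int) (acc : List String),
    (((cs.foldl
      (fun (st : Int × List String) ch =>
        if ch = '?' then (st.1 + 1, st.2 ++ ["$" ++ PySem.Int.toStr (st.1 + 1)])
        else (st.1, st.2 ++ [String.ofList [ch]]))
      (i, acc)).2).map String.toList).flatten =
      (acc.map String.toList).flatten ++ pvRun cs i := by
  induction cs with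
  | nil => intro i acc; simp [pvRun]
  | cons c rest ih =>
    intro i acc
    by_cases hc : c = '?'
    · subst hc
      simp only [List.foldl_cons]
      rw [ih]
      simp [pvRun, String.toList_append]
    · simp only [List.foldl_cons, if_neg hc]
      rw [ih]
      simp [pvRun, if_neg hc]

-- B's join, flattened
lemma pv_B_join (ps : List (List Char)) : ∀ (i : Int),
    (((PySem.List.enumerate (ps.map String.ofList) i).map
        (fun ip => "$" ++ PySem.Int.toStr ip.1 ++ ip.2)).map String.toList).flatten =
      pvInter ps i := by
  induction ps with
  | nil => intro i; simp [PySem.List.enumerate_nil, pvInter]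
  | cons p ps ih =>
    intro i
    simp only [List.map_cons, PySem.List.enumerate_cons, List.map_cons, List.flatten_cons]
    rw [ih]
    simp [pvInter, String.toList_append]

lemma pv_bridge (cs : List Char) : ∀ (i : Int),
    (pvSplitQ cs).headI ++ pvInter (pvSplitQ cs).tail (i + 1) = pvRun cs i := by
  induction cs with
  | nil => intro i; simp [pvSplitQ, pvInter, pvRun]
  | cons c rest ih =>
    intro i
    by_cases hc : c = '?'
    · subst hc
      simp only [pvSplitQ, List.headI, List.tail]
      cases h : pvSplitQ rest with
      | nil => exact absurd h (pvSplitQ_ne_nil rest)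
      | cons p ps =>
        have := ih (i + 1)
        rw [h] at this
        simp only [List.headI, List.tail] at this
        simp [pvRun, pvInter, ← this]
    · simp only [pvSplitQ, if_neg hc]
      cases h : pvSplitQ rest with
      | nil => exact absurd h (pvSplitQ_ne_nil rest)
      | cons p ps =>
        have := ih i
        rw [h] at this
        simp only [List.headI, List.tail] at this
        simp [pvRun, if_neg hc, ← this]

lemma pv_q_eq (query : String) :
    PySem.Str.join "" ((query.toList.foldl
      (fun (st : Int × List String) ch =>
        if ch = '?' then (st.1 + 1, st.2 ++ ["$" ++ PySem.Int.toStr (st.1 + 1)])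
        else (st.1, st.2 ++ [String.ofList [ch]]))
      (0, [])).2) =
    PySem.List.pyGetD ((PySem.Chars.splitOn query.toList "?".toList).map String.ofList) 0 "" ++
      PySem.Str.join "" ((PySem.List.enumerate
        (PySem.List.slice ((PySem.Chars.splitOn query.toList "?".toList).map String.ofList) (some 1) none) 1).map
        (fun ip => "$" ++ PySem.Int.toStr ip.1 ++ ip.2)) := by
  rw [← String.toList_inj]
  have hsep : ("?" : String).toList = ['?'] := by decide
  have hnil : ("" : String).toList = [] := by decide
  rw [String.toList_append, PySem.Str.toList_join, PySem.Str.toList_join, hnil,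
    pv_join_nil_flatten, pv_join_nil_flatten]
  · rw [hsep, pv_splitOn_eq]
    cases h : pvSplitQ query.toList with
    | nil => exact absurd h (pvSplitQ_ne_nil _)
    | cons p ps =>
      rw [pv_A_loop query.toList 0 []]
      have hsl : PySem.List.slice ((p :: ps).map String.ofList) (some 1) none =
          ps.map String.ofList := by
        rw [PySem.List.slice_from _ (by norm_num : (0:Int) ≤ 1)]
        simp
      rw [hsl, pv_B_join ps 1]
      have hget : PySem.List.pyGetD ((p :: ps).map String.ofList) 0 "" = String.ofList p := by
        rw [PySem.List.pyGetD_ofNat']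
        rfl
      rw [hget]
      have := pv_bridge query.toList 0
      rw [h] at this
      simp only [List.headI, List.tail] at this
      simp [← this]

-- ===== VERDICT (by name: the statement is the Claim_ definition above) =====
theorem to_pg_py_spec : Claim_equal_to_pg_py := by
  intro query _
  show to_pg_py query = to_pg_py_alt query
  exact congrArg (fun q => PySem.Str.replace
      (PySem.Str.replace q "INSERT OR REPLACE INTO" "INSERT INTO")
      "ON CONFLICT(chat_id) DO UPDATE SET enabled=1, title=excluded.title"
      "ON CONFLICT(chat_id) DO UPDATE SET enabled=TRUE, title=EXCLUDED.title")
    (pv_q_eq query)
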